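-- pv_equiv track=rewrite | github.com/jo-jil/Python-Leet-Code | 479. Largest Palindrome Product.py | palin
-- ===== SOURCE A (Python) =====
-- def palin(x,y):
--     num = str(x*y)
--     reverse_num = ''
--     for i in range(0,len(num)):
--         reverse_num = num[i] + reverse_num
--     if(num == reverse_num):
--         return True
--     else:
--         return False
-- ===== SOURCE B (Python) =====
-- def palin(x, y):
--     num = str(x * y)
--     i, j = 0, len(num) - 1
--     while i < j:
--         if num[i] != num[j]:
--             return False
--         i += 1
--         j -= 1
--     return True
-- ===== Notes on version B (the rewrite author's own statement) =====
-- stated objective: simpler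
-- what changed: Replaces the loop that builds a full reversed string (and the final string comparison) by an in-place two-pointer scan comparing digits from both ends with early exit on mismatch.
import Mathlib
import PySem

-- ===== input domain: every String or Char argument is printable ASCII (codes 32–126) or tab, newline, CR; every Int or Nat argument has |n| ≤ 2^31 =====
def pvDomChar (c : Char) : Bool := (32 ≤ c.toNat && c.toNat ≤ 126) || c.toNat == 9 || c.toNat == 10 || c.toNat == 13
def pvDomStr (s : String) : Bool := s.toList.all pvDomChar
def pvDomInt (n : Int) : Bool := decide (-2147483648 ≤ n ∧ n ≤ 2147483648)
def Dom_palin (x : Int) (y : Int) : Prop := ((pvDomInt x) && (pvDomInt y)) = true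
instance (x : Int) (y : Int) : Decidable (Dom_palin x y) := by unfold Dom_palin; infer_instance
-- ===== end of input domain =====

-- B replaces A's build-a-reversed-string-then-compare by a two-pointer inward scan; objective: simpler.

-- ===== PORT A =====
-- num = str(x*y); for i in range(0, len(num)): reverse_num = num[i] + reverse_num; return num == reverse_num
def palin (x : Int) (y : Int) : Bool :=
  let num : List Char := PySem.Int.toChars (x * y)
  let reverse_num : List Char :=
    (PySem.List.pyRange 0 (num.length : Int) 1).foldl
      (fun acc i => PySem.List.pyGetD num i ' ' :: acc) []
  num == reverse_num

-- ===== PORT B =====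
-- two-pointer while-loop: i from the left, j from the right, early False on mismatch
def palinTp (num : List Char) (i j : Nat) : Bool :=
  if i < j then
    if num.getD i ' ' ≠ num.getD j ' ' then false
    else palinTp num (i + 1) (j - 1)
  else true
termination_by j - i

def palin_alt (x : Int) (y : Int) : Bool :=
  let num : List Char := PySem.Int.toChars (x * y)
  palinTp num 0 (num.length - 1)

-- ===== PRECONDITION & SPEC =====
def Spec_palin (x : Int) (y : Int) (out : Bool) : Prop := out = palin_alt x y
instance (x : Int) (y : Int) (out : Bool) : Decidable (Spec_palin x y out) := by unfold Spec_palin; infer_instance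

-- ===== CLAIM (what is proved, stated in full; the proofs are below) =====
def Claim_equal_palin : Prop := ∀ (x : Int) (y : Int), Dom_palin x y → Spec_palin x y (palin x y)

-- ===== LEMMAS AND PROOFS =====

-- A's fold over indices builds the reverse of the character list
theorem palin_fold_reverse (l : List Char) :
    (PySem.List.pyRange 0 (l.length : Int) 1).foldl
      (fun acc i => PySem.List.pyGetD l i ' ' :: acc) [] = l.reverse := by
  rw [PySem.List.foldl_pyRange_zero_pyGetD' l ' ' (fun acc c => c :: acc) []]
  induction l using List.reverseRecOn with
  | nil => rfl
  | append_singleton xs x ih => simp [ih]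

-- the two-pointer loop decides the half-range pairwise condition
theorem palinTp_iff (l : List Char) (i j : Nat) :
    palinTp l i j = true ↔
      ∀ k, i ≤ k → 2 * k < i + j → l.getD k ' ' = l.getD (i + j - k) ' ' := by
  fun_induction palinTp l i j with
  | case1 i j hij hne =>
    simp only [Bool.false_eq_true, false_iff]
    push Not
    exact ⟨i, le_refl i, by omega, by rwa [show i + j - i = j by omega]⟩
  | case2 i j hij hne ih =>
    rw [not_not] at hne
    rw [ih]
    constructor
    · intro h k hk h2k
      rcases Nat.eq_or_lt_of_le hk with heq | hlt
      · rw [← heq, show i + j - i = j by omega]; exact hne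
      · have := h k (by omega) (by omega)
        rwa [show i + 1 + (j - 1) - k = i + j - k by omega] at this
    · intro h k hk h2k
      have := h k (by omega) (by omega)
      rwa [show i + j - k = i + 1 + (j - 1) - k by omega] at this
  | case3 i j hij =>
    constructor
    · intro _ k hk h2k; omega
    · intro _; rfl

-- list equals its reverse iff the two-pointer condition on 0 .. len-1 holds
theorem reverse_eq_iff_tp (l : List Char) :
    (l == l.reverse) = palinTp l 0 (l.length - 1) := by
  by_cases hb : palinTp l 0 (l.length - 1) = true
  · rw [hb, beq_iff_eq]
    rw [palinTp_iff] at hb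
    apply List.ext_getElem (by simp)
    intro n h1 h2
    have hlen : n < l.length := h1
    have key : ∀ m, m < l.length → l.getD m ' ' = l.getD (l.length - 1 - m) ' ' := by
      intro m hm
      rcases Nat.lt_trichotomy (2 * m) (l.length - 1) with h | h | h
      · have := hb m (Nat.zero_le m) (by omega)
        rwa [Nat.zero_add] at this
      · have : m = l.length - 1 - m := by omega
        rw [← this]
      · have := hb (l.length - 1 - m) (Nat.zero_le _) (by omega)
        rw [Nat.zero_add, show l.length - 1 - (l.length - 1 - m) = m by omega] at this
        exact this.symm
    have := key n hlen
    rw [List.getD_eq_getElem _ _ hlen, List.getD_eq_getElem _ _ (by omega)] at this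
    rw [this, List.getElem_reverse]
  · rw [Bool.not_eq_true] at hb
    rw [hb]
    rw [Bool.eq_false_iff]
    intro hco
    rw [beq_iff_eq] at hco
    have hb' := hb
    rw [← Bool.not_eq_true, palinTp_iff] at hb'
    push Not at hb'
    obtain ⟨k, _, h2k, hne⟩ := hb'
    apply hne
    have hk : k < l.length := by omega
    have hk' : l.length - 1 - k < l.length := by omega
    have hrv : l.reverse.getD k ' ' = l.getD (l.length - 1 - k) ' ' := by
      rw [List.getD_eq_getElem _ _ (by simpa using hk), List.getD_eq_getElem _ _ hk',
        List.getElem_reverse]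
    calc l.getD k ' ' = l.reverse.getD k ' ' := by rw [← hco]
      _ = l.getD (l.length - 1 - k) ' ' := hrv
      _ = l.getD (0 + (l.length - 1) - k) ' ' := by congr 1; omega

-- ===== VERDICT (by name: the statement is the Claim_ definition above) =====
theorem palin_spec : Claim_equal_palin := by
  intro x y _
  unfold Spec_palin palin palin_alt
  simp only []
  rw [palin_fold_reverse, reverse_eq_iff_tp]
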